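-- pv_equiv track=rewrite | github.com/AdrianMichael5/ShellSortTeoria | shell_sort.py | gaps_knuth
-- ===== SOURCE A (Python) =====
-- def gaps_knuth(n: int):
--     # Knuth: 1, 4, 13, 40, 121, ...  h = 3*h + 1; reverse to descend
--     gaps = []
--     h = 1
--     while h < n:
--         gaps.append(h)
--         h = 3*h + 1
--     for g in reversed(gaps):
--         if g > 0:
--             yield g
-- ===== SOURCE B (Python) =====
-- def gaps_knuth(n):
--     # closed form: Knuth gap h_k = (3**k - 1)//2; largest k with 3**k < 2*n + 1
--     k = 0
--     while 3 ** (k + 1) < 2 * n + 1: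
--         k += 1
--     for i in range(k, 0, -1):
--         yield (3 ** i - 1) // 2
-- ===== Notes on version B (the rewrite author's own statement) =====
-- stated objective: alternative
-- what changed: B replaces A's accumulate-then-reverse recurrence over h with the closed form for Knuth gaps: it finds the largest exponent whose gap is still below n and then yields each gap directly from its exponent in descending order, maintaining no list.
import Mathlib
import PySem

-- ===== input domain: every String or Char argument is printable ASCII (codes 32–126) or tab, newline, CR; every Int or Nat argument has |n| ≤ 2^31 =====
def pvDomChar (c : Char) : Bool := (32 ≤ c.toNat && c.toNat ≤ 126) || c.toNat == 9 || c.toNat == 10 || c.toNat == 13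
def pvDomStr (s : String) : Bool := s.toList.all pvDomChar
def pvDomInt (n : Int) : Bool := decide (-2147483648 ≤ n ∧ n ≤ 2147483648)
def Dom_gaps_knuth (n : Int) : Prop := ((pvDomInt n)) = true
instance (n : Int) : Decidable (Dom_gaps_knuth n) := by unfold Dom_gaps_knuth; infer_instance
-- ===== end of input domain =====

-- B computes each gap by the closed form (3^k - 1)//2 instead of A's 3h+1 recurrence with a reversed list; alternative decomposition, same asymptotic cost.
-- Both Pythons are generators; equivalence is about the sequence of yielded values (as a list).

-- ===== PORT A =====
-- while h < n: gaps.append(h); h = 3*h + 1   (h stays a nonnegative integer, carried as Nat for termination)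
def gk_loop (n : Int) (h : Nat) (gaps : List Int) : List Int :=
  if (h : Int) < n then gk_loop n (3 * h + 1) (gaps ++ [(h : Int)]) else gaps
termination_by (n - h).toNat
decreasing_by
  have : ((3 * h + 1 : Nat) : Int) = 3 * (h : Int) + 1 := by push_cast; ring
  omega

def gaps_knuth (n : Int) : List Int :=
  let gaps := gk_loop n 1 []
  -- for g in reversed(gaps): if g > 0: yield g
  gaps.reverse.foldl (fun acc g => if g > 0 then acc ++ [g] else acc) []

-- ===== PORT B =====
-- while 3 ** (k + 1) < 2 * n + 1: k += 1
def gk_find (n : Int) (k : Nat) : Nat :=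
  if (3 : Int) ^ (k + 1) < 2 * n + 1 then gk_find n (k + 1) else k
termination_by (2 * n + 1 - 3 ^ (k + 1)).toNat
decreasing_by
  have : (3 : Int) ^ (k + 1) < 3 ^ (k + 1 + 1) :=
    pow_lt_pow_right₀ (by norm_num) (by omega)
  omega

def gaps_knuth_alt (n : Int) : List Int :=
  -- k = gk_find n 0; for i in range(k, 0, -1): yield (3 ** i - 1) // 2
  (PySem.List.pyRange ((gk_find n 0 : Nat) : Int) 0 (-1)).map
    (fun i => PySem.Int.floordiv ((3 : Int) ^ i.toNat - 1) 2)

-- ===== PRECONDITION & SPEC =====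
def Spec_gaps_knuth (n : Int) (out : List Int) : Prop := out = gaps_knuth_alt n
instance (n : Int) (out : List Int) : Decidable (Spec_gaps_knuth n out) := by unfold Spec_gaps_knuth; infer_instance

-- ===== CLAIM (what is proved, stated in full; the proofs are below) =====
def Claim_equal_gaps_knuth : Prop := ∀ (n : Int), Dom_gaps_knuth n → Spec_gaps_knuth n (gaps_knuth n)

-- ===== LEMMAS AND PROOFS =====

-- the value of A's h after j iterations
def hval : Nat → Nat
  | 0 => 1
  | j + 1 => 3 * hval j + 1

theorem hval_pow (j : Nat) : 2 * hval j + 1 = 3 ^ (j + 1) := by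
  induction j with
  | zero => rfl
  | succ j ih => simp only [hval, pow_succ]; omega

theorem hval_pos (j : Nat) : 1 ≤ hval j := by
  cases j <;> simp [hval]

theorem gk_find_ge (n : Int) (j : Nat) : j ≤ gk_find n j := by
  have key : ∀ (m : Nat) (j : Nat), (2 * n + 1 - 3 ^ (j + 1)).toNat ≤ m → j ≤ gk_find n j := by
    intro m
    induction m with
    | zero =>
      intro j hm
      have hc : ¬ ((3 : Int) ^ (j + 1) < 2 * n + 1) := by omega
      rw [gk_find]
      simp [hc]
    | succ m ih =>
      intro j hm
      rw [gk_find]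
      by_cases hc : (3 : Int) ^ (j + 1) < 2 * n + 1
      · have hp : (3 : Int) ^ (j + 1) < 3 ^ (j + 1 + 1) :=
          pow_lt_pow_right₀ (by norm_num) (by omega)
        have := ih (j + 1) (by omega)
        simp only [if_pos hc]
        omega
      · simp [hc]
  exact key (2 * n + 1 - 3 ^ (j + 1)).toNat j le_rfl

theorem hval_cast_pow (j : Nat) : ((2 * hval j + 1 : Nat) : Int) = (3 : Int) ^ (j + 1) := by
  exact_mod_cast hval_pow j

theorem loop_acc (n : Int) (h : Nat) (gaps : List Int) :
    gk_loop n h gaps = gaps ++ gk_loop n h [] := by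
  have key : ∀ (m : Nat) (h : Nat), (n - h).toNat ≤ m →
      ∀ gaps, gk_loop n h gaps = gaps ++ gk_loop n h [] := by
    intro m
    induction m with
    | zero =>
      intro h hm gaps
      have hc : ¬ ((h : Int) < n) := by omega
      rw [gk_loop]
      simp only [if_neg hc]
      rw [gk_loop]
      simp [hc]
    | succ m ih =>
      intro h hm gaps
      rw [gk_loop]
      conv_rhs => rw [gk_loop]
      by_cases hc : (h : Int) < n
      · simp only [if_pos hc]
        have hcast : ((3 * h + 1 : Nat) : Int) = 3 * (h : Int) + 1 := by push_cast; ring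
        have hm' : (n - ((3 * h + 1 : Nat) : Int)).toNat ≤ m := by rw [hcast]; omega
        rw [ih (3 * h + 1) hm' (gaps ++ [(h : Int)]), ih (3 * h + 1) hm' ([] ++ [(h : Int)])]
        simp
      · simp [hc]
  exact key (n - h).toNat h le_rfl gaps

-- A's loop from state hval j produces the h-values indexed j, j+1, …, gk_find n j - 1
theorem loop_eq (n : Int) (j : Nat) :
    gk_loop n (hval j) [] =
      (List.range (gk_find n j - j)).map (fun t => ((hval (j + t) : Nat) : Int)) := by
  have key : ∀ (m : Nat) (j : Nat), (n - hval j).toNat ≤ m →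
      gk_loop n (hval j) [] =
        (List.range (gk_find n j - j)).map (fun t => ((hval (j + t) : Nat) : Int)) := by
    intro m
    induction m with
    | zero =>
      intro j hm
      have hpow := hval_cast_pow j
      have hc : ¬ (((hval j : Nat) : Int) < n) := by omega
      have hc' : ¬ ((3 : Int) ^ (j + 1) < 2 * n + 1) := by omega
      rw [gk_loop, gk_find]
      simp [hc, hc']
    | succ m ih =>
      intro j hm
      have hpow := hval_cast_pow j
      by_cases hc : (((hval j : Nat) : Int) < n)
      · have hc' : (3 : Int) ^ (j + 1) < 2 * n + 1 := by omega
        have hstep : (3 * hval j + 1 : Nat) = hval (j + 1) := rfl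
        have hm' : (n - (hval (j + 1) : Int)).toNat ≤ m := by
          have h1 := hval_pos j
          have h2 : ((hval (j + 1) : Nat) : Int) = 3 * (hval j : Int) + 1 := by
            simp only [hval]; push_cast; ring
          omega
        have ihj := ih (j + 1) hm'
        have hge : j + 1 ≤ gk_find n (j + 1) := gk_find_ge n (j + 1)
        rw [gk_loop]
        simp only [if_pos hc]
        rw [loop_acc, hstep, ihj]
        conv_rhs => rw [gk_find]
        simp only [if_pos hc']
        have hsub : gk_find n (j + 1) - j = (gk_find n (j + 1) - (j + 1)) + 1 := by omega
        rw [hsub, List.range_succ_eq_map, List.map_cons, List.map_map]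
        simp only [List.nil_append, List.singleton_append, Nat.add_zero]
        congr 1
        apply List.map_congr_left
        intro a _
        simp only [Function.comp_apply]
        congr 2
        omega
      · have hc' : ¬ ((3 : Int) ^ (j + 1) < 2 * n + 1) := by omega
        rw [gk_loop, gk_find]
        simp [hc, hc']
  exact key (n - hval j).toNat j le_rfl

theorem gaps_knuth_eq (n : Int) :
    gaps_knuth n = ((List.range (gk_find n 0)).map (fun t => ((hval t : Nat) : Int))).reverse := by
  have h0 : (1 : Nat) = hval 0 := rfl
  unfold gaps_knuth
  rw [h0, loop_eq n 0]
  simp only [Nat.sub_zero, Nat.zero_add]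
  rw [PySem.List.foldl_append_ite_eq_filter]
  rw [List.nil_append]
  apply List.filter_eq_self.mpr
  intro a ha
  simp only [List.mem_reverse, List.mem_map] at ha
  obtain ⟨t, _, rfl⟩ := ha
  have := hval_pos t
  simp only [decide_eq_true_eq]
  exact_mod_cast by omega

theorem gaps_knuth_alt_eq (n : Int) :
    gaps_knuth_alt n = ((List.range (gk_find n 0)).map (fun t => ((hval t : Nat) : Int))).reverse := by
  unfold gaps_knuth_alt
  rw [PySem.List.pyRange_neg_one_eq_reverse, List.map_reverse]
  congr 1
  have h01 : (0 : Int) + 1 = 1 := by norm_num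
  rw [h01, PySem.List.pyRange_one]
  have hlen : (((gk_find n 0 : Nat) : Int) + 1 - 1).toNat = gk_find n 0 := by omega
  rw [hlen, List.map_map]
  apply List.map_congr_left
  intro t ht
  simp only [List.mem_range] at ht
  simp only [Function.comp_apply]
  have htn : ((1 : Int) + (t : Nat)).toNat = t + 1 := by omega
  rw [htn]
  have hpow : (3 : Int) ^ (t + 1) - 1 = 2 * ((hval t : Nat) : Int) := by
    have := hval_cast_pow t
    omega
  rw [hpow, PySem.Int.floordiv_eq_ediv_of_pos (by norm_num)]
  omega

-- ===== VERDICT (by name: the statement is the Claim_ definition above) =====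
theorem gaps_knuth_spec : Claim_equal_gaps_knuth := by
  intro n _
  unfold Spec_gaps_knuth
  rw [gaps_knuth_eq, gaps_knuth_alt_eq]
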